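-- pv_equiv track=rewrite | github.com/Prpht/GUPB | gupb/controller/kirby_learning.py | opponents_hits_vector
-- ===== SOURCE A (Python) =====
-- from collections import defaultdict
--
-- def opponents_hits_vector(
--         opponents_hits: list[tuple[tuple[int, int], int]]
-- ) -> list[int]:
--     neighbourhood_hits = [
--         (-3, 0),
--         (-2, 0),
--         (-1, 0),
--         (-1, -1),
--         (-1, 1),
--         (0, -2),
--         (0, -1),
--         (0, 0),
--         (0, 1),
--         (0, 2),
--         (1, 0),
--     ]
--     hit_effects = defaultdict(lambda: 0)
--     for tile in opponents_hits:
--         relative_coord = tile[0]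
--         if relative_coord in neighbourhood_hits:
--             hit_effects[relative_coord] += tile[1]
--
--     return [hit_effects[i] for i in neighbourhood_hits]
-- ===== SOURCE B (Python) =====
-- def opponents_hits_vector(
--         opponents_hits: list[tuple[tuple[int, int], int]]
-- ) -> list[int]:
--     neighbourhood_hits = [
--         (-3, 0),
--         (-2, 0),
--         (-1, 0),
--         (-1, -1),
--         (-1, 1),
--         (0, -2),
--         (0, -1),
--         (0, 0),
--         (0, 1),
--         (0, 2),
--         (1, 0),
--     ]
--     return [sum(effect for coord, effect in opponents_hits if coord == target)
--             for target in neighbourhood_hits]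
-- ===== Notes on version B (the rewrite author's own statement) =====
-- stated objective: simpler
-- what changed: B drops the defaultdict accumulation pass entirely and instead emits each of the 11 output entries as a direct sum over the hits whose coordinate equals that neighbourhood cell.
import Mathlib
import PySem

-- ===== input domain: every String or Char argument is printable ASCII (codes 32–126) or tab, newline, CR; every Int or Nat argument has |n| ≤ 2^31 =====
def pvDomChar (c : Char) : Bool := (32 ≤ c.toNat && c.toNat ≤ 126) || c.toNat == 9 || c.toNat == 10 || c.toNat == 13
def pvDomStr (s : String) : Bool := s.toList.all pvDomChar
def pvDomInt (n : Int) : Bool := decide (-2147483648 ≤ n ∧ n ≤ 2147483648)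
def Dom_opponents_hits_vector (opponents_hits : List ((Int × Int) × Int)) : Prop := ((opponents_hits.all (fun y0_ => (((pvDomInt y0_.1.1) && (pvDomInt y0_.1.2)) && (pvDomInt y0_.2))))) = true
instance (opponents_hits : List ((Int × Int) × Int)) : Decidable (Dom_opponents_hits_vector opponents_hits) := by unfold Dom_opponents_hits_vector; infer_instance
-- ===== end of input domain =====

-- B replaces A's defaultdict-accumulation pass with a direct per-cell sum over the hits (objective: simpler).

def pvNeighbourhood : List (Int × Int) :=
  [(-3, 0), (-2, 0), (-1, 0), (-1, -1), (-1, 1), (0, -2), (0, -1), (0, 0), (0, 1), (0, 2), (1, 0)]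

-- ===== PORT A =====
def opponents_hits_vector (opponents_hits : List ((Int × Int) × Int)) : List Int :=
  let neighbourhood_hits := pvNeighbourhood
  let hit_effects :=
    opponents_hits.foldl
      (fun d tile =>
        let relative_coord := tile.1
        if relative_coord ∈ neighbourhood_hits then
          d.insert relative_coord (d.getD relative_coord 0 + tile.2)
        else d)
      (PySem.Dict.empty : PySem.Dict (Int × Int) Int)
  neighbourhood_hits.map (fun i => hit_effects.getD i 0)

-- ===== PORT B =====
def opponents_hits_vector_alt (opponents_hits : List ((Int × Int) × Int)) : List Int :=
  pvNeighbourhood.map (fun target =>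
    ((opponents_hits.filter (fun p => p.1 == target)).map (·.2)).sum)

-- ===== PRECONDITION & SPEC =====
def Spec_opponents_hits_vector (opponents_hits : List ((Int × Int) × Int)) (out : List Int) : Prop := out = opponents_hits_vector_alt opponents_hits
instance (opponents_hits : List ((Int × Int) × Int)) (out : List Int) : Decidable (Spec_opponents_hits_vector opponents_hits out) := by unfold Spec_opponents_hits_vector; infer_instance

-- ===== CLAIM (what is proved, stated in full; the proofs are below) =====
def Claim_equal_opponents_hits_vector : Prop := ∀ (opponents_hits : List ((Int × Int) × Int)), Dom_opponents_hits_vector opponents_hits → Spec_opponents_hits_vector opponents_hits (opponents_hits_vector opponents_hits)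

-- ===== LEMMAS AND PROOFS =====

theorem hits_foldl_getD (l : List ((Int × Int) × Int)) (d : PySem.Dict (Int × Int) Int)
    (c : Int × Int) (hc : c ∈ pvNeighbourhood) :
    (l.foldl
      (fun d tile =>
        if tile.1 ∈ pvNeighbourhood then
          d.insert tile.1 (d.getD tile.1 0 + tile.2)
        else d) d).getD c 0
      = d.getD c 0 + ((l.filter (fun p => p.1 == c)).map (·.2)).sum := by
  induction l generalizing d with
  | nil => simp
  | cons t l ih =>
    simp only [List.foldl_cons]
    by_cases hmem : t.1 ∈ pvNeighbourhood
    · rw [if_pos hmem, ih]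
      by_cases heq : t.1 = c
      · subst heq
        simp [PySem.Dict.getD_insert_self]
        ring
      · rw [PySem.Dict.getD_insert]
        simp [heq, Ne.symm heq]
    · rw [if_neg hmem]
      have hne : t.1 ≠ c := fun h => hmem (h ▸ hc)
      rw [ih]
      simp [hne]

-- ===== VERDICT (by name: the statement is the Claim_ definition above) =====
theorem opponents_hits_vector_spec : Claim_equal_opponents_hits_vector := by
  intro l _
  unfold Spec_opponents_hits_vector opponents_hits_vector opponents_hits_vector_alt
  refine List.map_congr_left ?_
  intro c hc
  rw [hits_foldl_getD l _ c hc]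
  simp
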